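-- pv_equiv track=rewrite | github.com/sngu37/ECE464_3 | sim.py | lfsrGen
-- ===== SOURCE A (Python) =====
-- def linearCalc(initalVal):
--     temp = initalVal[0]  # Get the MSB
--     sBinary = initalVal[-7:]
--
--     xorVals = int(sBinary[3:6]) ^ int(temp + temp + temp)
--     sBinary = sBinary[0:3] + repr(xorVals).zfill(3) + sBinary[6:7] + temp  # final value
--     return sBinary
--
-- def lfsrGen(seed):
--     lfsrSeq, lfsrSeqBin = "", []
--     initalVal = bin(seed)[2:].zfill(8)
--     lfsrSeq = initalVal + lfsrSeq
--     lfsrSeqBin.append(initalVal)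
--
--     currentVal = linearCalc(initalVal)
--     while initalVal != currentVal:
--         lfsrSeq = currentVal + lfsrSeq  # save
--         lfsrSeqBin.append(currentVal)
--         currentVal = linearCalc(currentVal)
--
--     lfsrSeqBin.append(lfsrSeq)
--     return lfsrSeqBin
-- ===== SOURCE B (Python) =====
-- def lfsrGen(seed):
--     # Integer-state LFSR: rotate-left of the 8-bit state, xoring bits 4..2 with the old MSB.
--     v0 = seed
--     states = []
--     v = v0
--     while True:
--         states.append(format(v, '08b'))
--         b = v >> 7
--         v = (((v << 1) & 0xFF) | b) ^ (0x1C * b)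
--         if v == v0:
--             break
--     states.append(''.join(reversed(states)))
--     return states
-- ===== Notes on version B (the rewrite author's own statement) =====
-- stated objective: alternative
-- what changed: B keeps the LFSR state as an 8-bit integer updated by rotate-and-xor bit arithmetic instead of A's decimal-string slicing/parsing feedback, and builds the concatenated history once at the end by joining the reversed state list instead of A's repeated string prepending inside the loop.
import Mathlib
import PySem

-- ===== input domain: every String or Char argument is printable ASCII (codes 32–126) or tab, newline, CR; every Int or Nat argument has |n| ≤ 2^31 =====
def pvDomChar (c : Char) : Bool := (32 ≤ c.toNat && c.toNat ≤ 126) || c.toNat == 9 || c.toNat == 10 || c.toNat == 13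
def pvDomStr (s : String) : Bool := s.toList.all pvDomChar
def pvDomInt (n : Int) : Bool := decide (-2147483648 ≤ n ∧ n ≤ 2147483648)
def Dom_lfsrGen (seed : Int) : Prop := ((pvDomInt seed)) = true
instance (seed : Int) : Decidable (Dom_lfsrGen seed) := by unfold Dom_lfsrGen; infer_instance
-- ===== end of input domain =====

-- B replaces A's string-splicing feedback step by integer bit arithmetic on the 8-bit state and
-- builds the concatenated history once at the end by joining the reversed state list (objective: alternative).

-- ===== PORT A =====
-- linearCalc: temp = s[0]; sBinary = s[-7:]; xorVals = int(sBinary[3:6]) ^ int(temp+temp+temp);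
-- return sBinary[0:3] + repr(xorVals).zfill(3) + sBinary[6:7] + temp.
-- s[0] and int(...) raise only on inputs never reached inside Pre_; the .getD defaults are totality guards only.
def linearCalcA (s : List Char) : List Char :=
  let temp : List Char := ((PySem.List.pyGet? s 0).map (fun c => [c])).getD []
  let sB := PySem.List.slice s (some (-7)) none
  let xorVals := PySem.Int.bxor
      ((PySem.Int.ofChars? (PySem.List.slice sB (some 3) (some 6))).getD 0)
      ((PySem.Int.ofChars? (temp ++ temp ++ temp)).getD 0)
  PySem.List.slice sB (some 0) (some 3) ++ PySem.Chars.zfill (PySem.Int.toChars xorVals) 3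
    ++ PySem.List.slice sB (some 6) (some 7) ++ temp

-- the while loop of A; fuel 255 is a totality guard only (inside Pre_ the state cycles back to the
-- seed string in at most 254 iterations, so the guard is never the reason the recursion stops)
def lfsrLoopA : Nat → List Char → List Char → List Char → List (List Char) → List Char × List (List Char)
  | 0, _, _, seq, bin => (seq, bin)
  | fuel + 1, init, cur, seq, bin =>
    if init = cur then (seq, bin)
    else lfsrLoopA fuel init (linearCalcA cur) (cur ++ seq) (bin ++ [cur])

def lfsrGen (seed : Int) : List String :=
  let init := PySem.Chars.zfill (PySem.List.slice (PySem.Int.toBinChars0b seed) (some 2) none) 8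
  let res := lfsrLoopA 255 init (linearCalcA init) init [init]
  (res.2 ++ [res.1]).map String.mk

-- ===== PORT B =====
-- while True: states.append(format(v,'08b')); b = v >> 7; v = (((v<<1)&0xFF)|b)^(0x1C*b); if v==v0: break
-- fuel 256 is a totality guard only (the 8-bit state cycles back to the seed in at most 255 steps)
def lfsrLoopB : Nat → Int → Int → List (List Char) → List (List Char)
  | 0, _, _, states => states
  | fuel + 1, v0, v, states =>
    let states' := states ++ [PySem.Chars.zfill (PySem.Int.toBinChars v) 8]
    let b := v >>> 7
    let v' := PySem.Int.bxor (PySem.Int.bor (PySem.Int.band (v <<< 1) 0xFF) b) (0x1C * b)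
    if v' = v0 then states' else lfsrLoopB fuel v0 v' states'

def lfsrGen_alt (seed : Int) : List String :=
  let states := lfsrLoopB 256 seed seed []
  (states ++ [PySem.Chars.join [] states.reverse]).map String.mk

-- ===== PRECONDITION & SPEC =====
-- Pre_ excludes seed < 0 (int() in linearCalc then raises ValueError on the 'b' left from bin(seed))
-- and seed ≥ 256 (the 8-char state strings then never equal the 9+-char seed string: A loops forever).
def Pre_lfsrGen (seed : Int) : Prop := 0 ≤ seed ∧ seed < 256
instance (seed : Int) : Decidable (Pre_lfsrGen seed) := by unfold Pre_lfsrGen; infer_instance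
def pvWitness_lfsrGen : Int := (5)

def Spec_lfsrGen (seed : Int) (out : List String) : Prop := out = lfsrGen_alt seed
instance (seed : Int) (out : List String) : Decidable (Spec_lfsrGen seed out) := by unfold Spec_lfsrGen; infer_instance

-- ===== CLAIM (what is proved, stated in full; the proofs are below) =====
def Claim_equal_lfsrGen : Prop := ∀ (seed : Int), Dom_lfsrGen seed → Pre_lfsrGen seed → Spec_lfsrGen seed (lfsrGen seed)

-- ===== LEMMAS AND PROOFS =====

-- the 8-bit state as its 8-char binary string, and B's feedback step on integers
def bits8 (v : Fin 256) : List Char := PySem.Chars.zfill (PySem.Int.toBinChars ((v : Nat) : Int)) 8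

def stepI (v : Int) : Int :=
  PySem.Int.bxor (PySem.Int.bor (PySem.Int.band (v <<< 1) 0xFF) (v >>> 7)) (0x1C * (v >>> 7))

def fF (v : Fin 256) : Fin 256 := ⟨(stepI ((v : Nat) : Int)).toNat % 256, Nat.mod_lt _ (by norm_num)⟩

-- the fuel-truncated run of states, A-shaped (test before emit) and B-shaped (emit before test)
def chainA : Nat → Fin 256 → Fin 256 → List (Fin 256)
  | 0, _, _ => []
  | fuel + 1, v0, v => if v = v0 then [] else v :: chainA fuel v0 (fF v)

def chainB : Nat → Fin 256 → Fin 256 → List (Fin 256)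
  | 0, _, _ => []
  | fuel + 1, v0, v => v :: (if fF v = v0 then [] else chainB fuel v0 (fF v))

set_option maxRecDepth 100000 in
set_option maxHeartbeats 1000000 in
lemma stepI_eq : ∀ v : Fin 256, stepI ((v : Nat) : Int) = (((fF v : Nat)) : Int) := by decide

set_option maxRecDepth 100000 in
set_option maxHeartbeats 1000000 in
lemma linearCalcA_bits8 : ∀ v : Fin 256, linearCalcA (bits8 v) = bits8 (fF v) := by decide

set_option maxRecDepth 100000 in
set_option maxHeartbeats 1000000 in
lemma init_bits8 : ∀ v : Fin 256,
    PySem.Chars.zfill (PySem.List.slice (PySem.Int.toBinChars0b ((v : Nat) : Int)) (some 2) none) 8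
      = bits8 v := by decide

set_option maxRecDepth 100000 in
set_option maxHeartbeats 1000000 in
lemma bits8_roundtrip : ∀ v : Fin 256, PySem.Int.ofCharsBase? (bits8 v) 2 = some ((v : Nat) : Int) := by
  decide

lemma bits8_inj_iff (a b : Fin 256) : bits8 a = bits8 b ↔ a = b := by
  constructor
  · intro h
    have ha := bits8_roundtrip a
    rw [h, bits8_roundtrip b] at ha
    have : ((b : Nat) : Int) = ((a : Nat) : Int) := by injection ha
    exact (Fin.val_injective (by exact_mod_cast this)).symm
  · intro h; rw [h]

lemma join_nil_flatten : ∀ l : List (List Char), PySem.Chars.join [] l = l.flatten := by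
  intro l
  induction l with
  | nil => rfl
  | cons x xs ih =>
    cases xs with
    | nil => simp [PySem.Chars.join, List.intercalate]
    | cons y ys =>
      simp only [PySem.Chars.join, List.intercalate] at *
      simp [List.intersperse] at *
      simp [ih]

lemma chainA_self (fuel : Nat) (v0 : Fin 256) : chainA fuel v0 v0 = [] := by
  cases fuel <;> simp [chainA]

lemma chainB_eq_chainA (fuel : Nat) (v0 v : Fin 256) (h : v ≠ v0) :
    chainB fuel v0 v = chainA fuel v0 v := by
  induction fuel generalizing v with
  | zero => rfl
  | succ fuel ih =>
    simp only [chainA, chainB, if_neg h]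
    by_cases hf : fF v = v0
    · simp [hf, chainA_self]
    · simp [hf, ih _ hf]

lemma chainB_succ_self (fuel : Nat) (v0 : Fin 256) :
    chainB (fuel + 1) v0 v0 = v0 :: chainA fuel v0 (fF v0) := by
  simp only [chainB]
  by_cases hf : fF v0 = v0
  · simp [hf, chainA_self]
  · simp [hf, chainB_eq_chainA fuel v0 (fF v0) hf]

lemma loopA_spec (fuel : Nat) (v0 : Fin 256) :
    ∀ (v : Fin 256) (seq : List Char) (bin : List (List Char)),
    lfsrLoopA fuel (bits8 v0) (bits8 v) seq bin
      = (((chainA fuel v0 v).map bits8).reverse.flatten ++ seq,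
         bin ++ (chainA fuel v0 v).map bits8) := by
  induction fuel with
  | zero => intro v seq bin; simp [lfsrLoopA, chainA]
  | succ fuel ih =>
    intro v seq bin
    by_cases h : v = v0
    · subst h
      simp [lfsrLoopA, chainA]
    · have hne : ¬ bits8 v0 = bits8 v := by
        rw [bits8_inj_iff]; exact fun e => h e.symm
      simp only [lfsrLoopA, if_neg hne, linearCalcA_bits8, chainA, if_neg h]
      rw [ih (fF v)]
      simp [List.append_assoc]

lemma loopB_spec (fuel : Nat) (v0 : Fin 256) :
    ∀ (v : Fin 256) (states : List (List Char)),
    lfsrLoopB fuel ((v0 : Nat) : Int) ((v : Nat) : Int) states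
      = states ++ (chainB fuel v0 v).map bits8 := by
  induction fuel with
  | zero => intro v states; simp [lfsrLoopB, chainB]
  | succ fuel ih =>
    intro v states
    have hstep : PySem.Int.bxor
        (PySem.Int.bor (PySem.Int.band (((v : Nat) : Int) <<< 1) (255 : Int)) (((v : Nat) : Int) >>> 7))
        ((28 : Int) * (((v : Nat) : Int) >>> 7)) = (((fF v : Nat)) : Int) := stepI_eq v
    simp only [lfsrLoopB]
    rw [hstep]
    by_cases hf : fF v = v0
    · have hcast : (((fF v : Nat)) : Int) = ((v0 : Nat) : Int) := by rw [hf]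
      rw [if_pos hcast]
      simp only [chainB, if_pos hf]
      simp [bits8]
    · have hne : ¬ (((fF v : Nat)) : Int) = ((v0 : Nat) : Int) := by
        intro e
        exact hf (Fin.val_injective (by exact_mod_cast e))
      rw [if_neg hne, ih (fF v)]
      simp only [chainB, if_neg hf]
      simp [bits8]

lemma main_fin (v : Fin 256) : lfsrGen ((v : Nat) : Int) = lfsrGen_alt ((v : Nat) : Int) := by
  simp only [lfsrGen, lfsrGen_alt]
  rw [init_bits8, linearCalcA_bits8, loopA_spec 255, loopB_spec 256]
  have hc : chainB 256 v v = v :: chainA 255 v (fF v) := chainB_succ_self 255 v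
  rw [hc]
  simp [join_nil_flatten, List.flatten_append]

-- ===== VERDICT (by name: the statement is the Claim_ definition above) =====
theorem lfsrGen_spec : Claim_equal_lfsrGen := by
  intro seed _ hpre
  unfold Spec_lfsrGen
  obtain ⟨h0, h256⟩ := hpre
  have hlt : seed.toNat < 256 := by omega
  have h2 : seed = (((⟨seed.toNat, hlt⟩ : Fin 256) : Nat) : Int) := by
    show seed = ((seed.toNat : Nat) : Int)
    omega
  rw [h2]
  exact main_fin ⟨seed.toNat, hlt⟩
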